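-- pv_equiv track=rewrite | github.com/lfscheidegger/aoc2023 | day18.py | get_trench_map
-- ===== SOURCE A (Python) =====
-- from typing import List, Tuple, Dict, Set, Collection
--
-- def get_trench_map(dug_cubes: Collection[Tuple[int, int]]) -> Tuple[str]:
--     min_x = min(dug_cubes, key=lambda cube: cube[0])[0]
--     max_x = max(dug_cubes, key=lambda cube: cube[0])[0]
--
--     min_y = min(dug_cubes, key=lambda cube: cube[1])[1]
--     max_y = max(dug_cubes, key=lambda cube: cube[1])[1]
--
--     width = max_x - min_x + 1
--     height = max_y - min_y + 1
--
--     result = [['.'] * width for _ in range(height)]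
--
--     for dug_cube in dug_cubes:
--         x = dug_cube[0] - min_x
--         y = dug_cube[1] - min_y
--         result[y][x] = '#'
--
--     return tuple(''.join(line) for line in result)
-- ===== SOURCE B (Python) =====
-- def get_trench_map(dug_cubes):
--     min_x = min(dug_cubes, key=lambda cube: cube[0])[0]
--     max_x = max(dug_cubes, key=lambda cube: cube[0])[0]
--     min_y = min(dug_cubes, key=lambda cube: cube[1])[1]
--     max_y = max(dug_cubes, key=lambda cube: cube[1])[1]
--     width = max_x - min_x + 1
--     height = max_y - min_y + 1
--     dug = set(dug_cubes)
--     return tuple(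
--         ''.join('#' if (x + min_x, y + min_y) in dug else '.' for x in range(width))
--         for y in range(height))
-- ===== Notes on version B (the rewrite author's own statement) =====
-- stated objective: alternative
-- what changed: B inverts the traversal: instead of allocating a mutable grid and scattering '#' marks into it cube by cube, it builds a set of dug cubes once and generates each row by scanning grid cells with a per-cell membership test.
import Mathlib
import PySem

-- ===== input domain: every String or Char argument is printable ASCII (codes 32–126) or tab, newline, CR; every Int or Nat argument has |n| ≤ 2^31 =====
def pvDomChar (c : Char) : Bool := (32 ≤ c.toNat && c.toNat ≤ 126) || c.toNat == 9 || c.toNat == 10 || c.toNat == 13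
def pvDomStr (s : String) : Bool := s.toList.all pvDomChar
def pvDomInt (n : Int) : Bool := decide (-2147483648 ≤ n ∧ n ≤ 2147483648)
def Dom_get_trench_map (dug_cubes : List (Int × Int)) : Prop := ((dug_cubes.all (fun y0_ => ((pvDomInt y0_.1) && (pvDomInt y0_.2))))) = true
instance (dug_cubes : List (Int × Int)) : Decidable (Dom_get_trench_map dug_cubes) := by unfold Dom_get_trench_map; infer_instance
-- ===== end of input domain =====

-- B scans every grid cell with a set-membership test instead of scattering marks into a mutable grid (objective: alternative traversal, similar cost); return-value equivalence on nonempty input.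


-- ===== PORT A =====
-- Python's result[y][x] = '#' is ported with .toNat indices: on every input that
-- reaches the loop the indices are in [0, height) × [0, width) (min/max bounds),
-- so no negative-index wraparound is reachable and List.modify/List.set are exact.
-- ''.join(line) on a list of single characters is String.mk.
def get_trench_map (dug_cubes : List (Int × Int)) : List String :=
  match PySem.List.min? dug_cubes (fun cube => cube.1),
        PySem.List.max? dug_cubes (fun cube => cube.1),
        PySem.List.min? dug_cubes (fun cube => cube.2),
        PySem.List.max? dug_cubes (fun cube => cube.2) with
  | some mnx, some mxx, some mny, some mxy =>
    let min_x := mnx.1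
    let max_x := mxx.1
    let min_y := mny.2
    let max_y := mxy.2
    let width := max_x - min_x + 1
    let height := max_y - min_y + 1
    let result : List (List Char) := List.replicate height.toNat (List.replicate width.toNat '.')
    let result := dug_cubes.foldl
      (fun res cube =>
        res.modify (cube.2 - min_y).toNat (fun row => row.set (cube.1 - min_x).toNat '#')) result
    result.map (fun line => String.mk line)
  | _, _, _, _ => []   -- unreachable under Pre_ (Python raises ValueError on the empty list)

-- ===== PORT B =====
def get_trench_map_alt (dug_cubes : List (Int × Int)) : List String :=
  match PySem.List.min? dug_cubes (fun cube => cube.1) with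
  | none => []   -- unreachable under Pre_ (Python raises ValueError on the empty list)
  | some mnx =>
    match PySem.List.max? dug_cubes (fun cube => cube.1) with
    | none => []
    | some mxx =>
      match PySem.List.min? dug_cubes (fun cube => cube.2) with
      | none => []
      | some mny =>
        match PySem.List.max? dug_cubes (fun cube => cube.2) with
        | none => []
        | some mxy =>
          let min_x := mnx.1
          let max_x := mxx.1
          let min_y := mny.2
          let max_y := mxy.2
          let width := max_x - min_x + 1
          let height := max_y - min_y + 1
          let dug := PySem.Set.ofList dug_cubes
          (PySem.List.pyRange 0 height 1).map (fun y =>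
            String.mk ((PySem.List.pyRange 0 width 1).map (fun x =>
              if PySem.Set.contains dug (x + min_x, y + min_y) then '#' else '.')))

-- ===== PRECONDITION & SPEC =====
-- Pre_ excludes exactly the empty list, on which Python A raises ValueError
-- (min() of an empty sequence); B raises there too.
def Pre_get_trench_map (dug_cubes : List (Int × Int)) : Prop := dug_cubes ≠ []
instance (dug_cubes : List (Int × Int)) : Decidable (Pre_get_trench_map dug_cubes) := by unfold Pre_get_trench_map; infer_instance
def pvWitness_get_trench_map : (List (Int × Int)) := [(0, 0), (2, 1)]

def Spec_get_trench_map (dug_cubes : List (Int × Int)) (out : List String) : Prop := out = get_trench_map_alt dug_cubes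
instance (dug_cubes : List (Int × Int)) (out : List String) : Decidable (Spec_get_trench_map dug_cubes out) := by unfold Spec_get_trench_map; infer_instance

-- ===== CLAIM (what is proved, stated in full; the proofs are below) =====
def Claim_equal_get_trench_map : Prop := ∀ (dug_cubes : List (Int × Int)), Dom_get_trench_map dug_cubes → Pre_get_trench_map dug_cubes → Spec_get_trench_map dug_cubes (get_trench_map dug_cubes)

-- ===== LEMMAS AND PROOFS =====

def pvCell (g : List (List Char)) (y x : Nat) : Char := (g.getD y []).getD x ' '

lemma pvCell_modify_set (g : List (List Char)) (i j y x : Nat)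
    (hi : i < g.length) (hj : j < (g.getD i []).length) :
    pvCell (g.modify i (fun row => row.set j '#')) y x =
      if y = i ∧ x = j then '#' else pvCell g y x := by
  unfold pvCell
  simp only [List.getD_eq_getElem?_getD, List.getElem?_modify]
  by_cases hy : y = i
  · subst hy
    have hsome : g[y]? = some (g[y]'hi) := List.getElem?_eq_getElem hi
    rw [hsome]
    simp only [Option.map_eq_map, Option.map_some, Option.getD_some]
    have hrow : g.getD y [] = g[y]'hi := by
      rw [List.getD_eq_getElem?_getD, hsome]; rfl
    rw [hrow] at hj
    by_cases hx : x = j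
    · subst hx; simp [hj]
    · simp [hx, Ne.symm hx, List.getD_eq_getElem?_getD]
  · have h2 : ¬ (i = y) := fun h => hy h.symm
    simp [h2, hy]

lemma pvFoldl_cell (minx miny : Int) (W H : Nat) :
    ∀ (l : List (Int × Int)) (g : List (List Char)),
    (∀ p ∈ l, 0 ≤ p.1 - minx ∧ (p.1 - minx).toNat < W ∧ 0 ≤ p.2 - miny ∧ (p.2 - miny).toNat < H) →
    g.length = H → (∀ j, j < H → (g.getD j []).length = W) →
    (l.foldl (fun res cube =>
        res.modify (cube.2 - miny).toNat (fun row => row.set (cube.1 - minx).toNat '#')) g).length = H ∧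
    (∀ j, j < H → (((l.foldl (fun res cube =>
        res.modify (cube.2 - miny).toNat (fun row => row.set (cube.1 - minx).toNat '#')) g)).getD j []).length = W) ∧
    (∀ y x : Nat, y < H → x < W →
      pvCell (l.foldl (fun res cube =>
        res.modify (cube.2 - miny).toNat (fun row => row.set (cube.1 - minx).toNat '#')) g) y x =
        if ((x : Int) + minx, (y : Int) + miny) ∈ l then '#' else pvCell g y x) := by
  intro l
  induction l with
  | nil => intro g hb hg hrow; exact ⟨hg, hrow, by intro y x hy hx; simp⟩
  | cons p t ih =>
    intro g hb hg hrow
    have hp := hb p (List.mem_cons_self)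
    have hiH : (p.2 - miny).toNat < g.length := by rw [hg]; exact hp.2.2.2
    have hjW : (p.1 - minx).toNat < (g.getD (p.2 - miny).toNat []).length := by
      rw [hrow _ hp.2.2.2]; exact hp.2.1
    simp only [List.foldl_cons]
    set g' := g.modify (p.2 - miny).toNat (fun row => row.set (p.1 - minx).toNat '#') with hg'def
    have hg' : g'.length = H := by rw [hg'def, List.length_modify, hg]
    have hrow' : ∀ j, j < H → (g'.getD j []).length = W := by
      intro j hj
      rw [hg'def]
      simp only [List.getD_eq_getElem?_getD, List.getElem?_modify]
      by_cases hij : (p.2 - miny).toNat = j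
      · subst hij
        rw [List.getElem?_eq_getElem hiH]
        simp only [Option.map_eq_map, Option.map_some, Option.getD_some, if_true,
          List.length_set]
        have := hrow _ hj
        rw [List.getD_eq_getElem?_getD, List.getElem?_eq_getElem hiH] at this
        simpa using this
      · simp only [hij, if_neg, Option.map_eq_map]
        have := hrow j hj
        rw [List.getD_eq_getElem?_getD] at this
        cases hc : g[j]? with
        | none => simp [hc] at this ⊢; exact this
        | some r => simp [hc] at this ⊢; simpa [hij] using this
    obtain ⟨hL, hR, hC⟩ := ih g' (fun q hq => hb q (List.mem_cons_of_mem _ hq)) hg' hrow'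
    refine ⟨hL, hR, ?_⟩
    intro y x hy hx
    rw [hC y x hy hx, hg'def, pvCell_modify_set g _ _ y x hiH hjW]
    by_cases hm : ((x : Int) + minx, (y : Int) + miny) ∈ t
    · simp [hm]
    · have hiff : (y = (p.2 - miny).toNat ∧ x = (p.1 - minx).toNat) ↔
          ((x : Int) + minx, (y : Int) + miny) = p := by
        rw [Prod.ext_iff]
        constructor
        · rintro ⟨h1, h2⟩; constructor <;> simp <;> omega
        · rintro ⟨h1, h2⟩; simp at h1 h2; constructor <;> omega
      rw [if_neg hm]
      simp only [List.mem_cons, hm, or_false]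
      by_cases he : ((x : Int) + minx, (y : Int) + miny) = p
      · rw [if_pos (hiff.mpr he), if_pos he]
      · rw [if_neg (fun h => he (hiff.mp h)), if_neg he]

lemma pv_main : ∀ (l : List (Int × Int)), l ≠ [] → get_trench_map l = get_trench_map_alt l := by
  intro l hpre
  rcases h1 : PySem.List.min? l (fun cube => cube.1) with _ | mnx
  · exact absurd ((PySem.List.min?_eq_none_iff _ _).mp h1) hpre
  rcases h2 : PySem.List.max? l (fun cube => cube.1) with _ | mxx
  · exact absurd ((PySem.List.max?_eq_none_iff _ _).mp h2) hpre
  rcases h3 : PySem.List.min? l (fun cube => cube.2) with _ | mny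
  · exact absurd ((PySem.List.min?_eq_none_iff _ _).mp h3) hpre
  rcases h4 : PySem.List.max? l (fun cube => cube.2) with _ | mxy
  · exact absurd ((PySem.List.max?_eq_none_iff _ _).mp h4) hpre
  simp only [get_trench_map, get_trench_map_alt, h1, h2, h3, h4]
  set minx := mnx.1 with hminx
  set miny := mny.2 with hminy
  set W := (mxx.1 - mnx.1 + 1).toNat with hW
  set H := (mxy.2 - mny.2 + 1).toNat with hH
  -- bounds
  have hbmin : ∀ p ∈ l, mnx.1 ≤ p.1 := PySem.List.min?_isMin h1
  have hbmax : ∀ p ∈ l, p.1 ≤ mxx.1 := PySem.List.max?_isMax h2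
  have hbmin' : ∀ p ∈ l, mny.2 ≤ p.2 := PySem.List.min?_isMin h3
  have hbmax' : ∀ p ∈ l, p.2 ≤ mxy.2 := PySem.List.max?_isMax h4
  have hb : ∀ p ∈ l, 0 ≤ p.1 - minx ∧ (p.1 - minx).toNat < W ∧ 0 ≤ p.2 - miny ∧ (p.2 - miny).toNat < H := by
    intro p hp
    have := hbmin p hp; have := hbmax p hp; have := hbmin' p hp; have := hbmax' p hp
    refine ⟨by omega, by omega, by omega, by omega⟩
  have hinit_len : (List.replicate H (List.replicate W '.')).length = H := by simp
  have hinit_row : ∀ j, j < H → ((List.replicate H (List.replicate W '.')).getD j []).length = W := by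
    intro j hj; rw [List.getD_replicate _ hj]; simp
  obtain ⟨hL, hR, hC⟩ := pvFoldl_cell minx miny W H l
    (List.replicate H (List.replicate W '.')) hb hinit_len hinit_row
  set G := l.foldl (fun res cube =>
      res.modify (cube.2 - miny).toNat (fun row => row.set (cube.1 - minx).toNat '#'))
      (List.replicate H (List.replicate W '.')) with hGdef
  show G.map (fun line => String.mk line) = _
  simp only [PySem.List.pyRange_one, Int.sub_zero, List.map_map, Function.comp_def, zero_add]
  apply List.ext_getElem
  · simp only [List.length_map, hL, List.length_range]
    omega
  intro y hy1 hy2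
  rw [List.length_map, hL] at hy1
  have hGy0 : G.getD y [] = G[y] := by
    rw [List.getD_eq_getElem?_getD, List.getElem?_eq_getElem (by rw [hL]; exact hy1)]
    rfl
  have hrowy := hR y hy1
  rw [hGy0] at hrowy
  simp only [List.getElem_map, List.getElem_range]
  congr 1
  apply List.ext_getElem
  · simp only [List.length_map, List.length_range, hrowy]
    exact hW
  intro x hx1 hx2
  have hxW : x < W := by rw [hrowy] at hx1; exact hx1
  have hcell := hC y x hy1 hxW
  unfold pvCell at hcell
  rw [hGy0, List.getD_eq_getElem?_getD, List.getElem?_eq_getElem hx1,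
    Option.getD_some] at hcell
  simp only [List.getElem_map, List.getElem_range]
  rw [hcell]
  have hinit : ((List.replicate H (List.replicate W '.')).getD y []).getD x ' ' = '.' := by
    rw [List.getD_replicate _ hy1, List.getD_replicate _ hxW]
  rw [hinit]
  by_cases hm : ((x : Int) + minx, (y : Int) + miny) ∈ l
  · rw [if_pos hm, if_pos]
    rw [PySem.Set.contains_iff, PySem.Set.mem_ofList]
    exact hm
  · rw [if_neg hm, if_neg]
    rw [PySem.Set.contains_iff, PySem.Set.mem_ofList]
    exact hm

-- ===== VERDICT (by name: the statement is the Claim_ definition above) =====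
theorem get_trench_map_spec : Claim_equal_get_trench_map := by
  intro dug_cubes _hdom hpre
  unfold Spec_get_trench_map
  exact pv_main dug_cubes hpre
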